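-- pv_equiv track=rewrite | github.com/mateusfaissal/PathFinder-FPAA | pathfinder.py | format_path_output
-- ===== SOURCE A (Python) =====
-- from typing import List, Tuple, Optional, Set
--
-- def format_path_output(path: List[Tuple[int, int]]) -> str:
--     formatted = []
--     for i, (row, col) in enumerate(path):
--         if i == 0:
--             formatted.append(f"s({row}, {col})")
--         elif i == len(path) - 1:
--             formatted.append(f"e({row}, {col})")
--         else:
--             formatted.append(f"({row}, {col})")
--
--     return "[" + ", ".join(formatted) + "]"
-- ===== SOURCE B (Python) =====
-- def _rest(rest):
--     if not rest:
--         return ""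
--     r, c = rest[0]
--     if len(rest) == 1:
--         return ", e({}, {})".format(r, c)
--     return ", ({}, {})".format(r, c) + _rest(rest[1:])
--
--
-- def format_path_output(path):
--     if not path:
--         return "[]"
--     r, c = path[0]
--     return "[s({}, {})".format(r, c) + _rest(path[1:]) + "]"
-- ===== Notes on version B (the rewrite author's own statement) =====
-- stated objective: alternative
-- what changed: Replaces A's enumerate loop with index comparisons, an accumulated list and a join by direct recursion on the list structure that concatenates the output string piece by piece (head emitted with 's', a recursive helper emits each ', (r, c)' separator-first and detects the last element structurally), building no intermediate list and calling no join.
import Mathlib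
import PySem

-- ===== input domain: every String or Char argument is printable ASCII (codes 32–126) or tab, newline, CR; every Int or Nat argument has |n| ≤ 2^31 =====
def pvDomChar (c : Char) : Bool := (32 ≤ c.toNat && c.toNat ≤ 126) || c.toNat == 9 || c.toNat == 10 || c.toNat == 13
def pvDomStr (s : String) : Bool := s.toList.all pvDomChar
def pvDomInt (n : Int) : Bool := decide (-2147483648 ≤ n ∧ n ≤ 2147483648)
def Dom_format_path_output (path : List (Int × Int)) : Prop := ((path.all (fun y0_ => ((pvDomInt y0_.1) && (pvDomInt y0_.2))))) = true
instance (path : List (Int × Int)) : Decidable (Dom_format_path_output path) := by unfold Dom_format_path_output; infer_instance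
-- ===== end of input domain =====

-- B replaces A's enumerate loop + accumulated list + join by direct structural
-- recursion that concatenates the output string piece by piece (objective: alternative).

-- ===== PORT A =====
-- A: loop over enumerate(path), branching on i == 0 / i == len(path)-1, then join.
def format_path_output (path : List (Int × Int)) : String :=
  let formatted : List String :=
    (PySem.List.enumerate path).foldl (fun acc p =>
      if p.1 == 0 then
        acc ++ ["s(" ++ PySem.Int.toStr p.2.1 ++ ", " ++ PySem.Int.toStr p.2.2 ++ ")"]
      else if p.1 == (path.length : Int) - 1 then
        acc ++ ["e(" ++ PySem.Int.toStr p.2.1 ++ ", " ++ PySem.Int.toStr p.2.2 ++ ")"]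
      else
        acc ++ ["(" ++ PySem.Int.toStr p.2.1 ++ ", " ++ PySem.Int.toStr p.2.2 ++ ")"]) []
  "[" ++ PySem.Str.join ", " formatted ++ "]"

-- ===== PORT B =====
-- _rest(rest): recursion on rest[1:], last element detected by len(rest) == 1
def pvRest : List (Int × Int) → String
  | [] => ""
  | [(r, c)] => ", e(" ++ PySem.Int.toStr r ++ ", " ++ PySem.Int.toStr c ++ ")"
  | (r, c) :: rest =>
      ", (" ++ PySem.Int.toStr r ++ ", " ++ PySem.Int.toStr c ++ ")" ++ pvRest rest

def format_path_output_alt (path : List (Int × Int)) : String :=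
  match path with
  | [] => "[]"
  | (r, c) :: rest =>
      "[s(" ++ PySem.Int.toStr r ++ ", " ++ PySem.Int.toStr c ++ ")" ++ pvRest rest ++ "]"

-- ===== PRECONDITION & SPEC =====
def Spec_format_path_output (path : List (Int × Int)) (out : String) : Prop := out = format_path_output_alt path
instance (path : List (Int × Int)) (out : String) : Decidable (Spec_format_path_output path out) := by unfold Spec_format_path_output; infer_instance

-- ===== CLAIM =====
def Claim_equal_format_path_output : Prop := ∀ (path : List (Int × Int)), Dom_format_path_output path → Spec_format_path_output path (format_path_output path)

-- ===== LEMMAS AND PROOFS =====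

-- A's per-element value as a function of the enumerated pair
def pvG (n : Int) (p : Int × (Int × Int)) : String :=
  if p.1 == 0 then "s(" ++ PySem.Int.toStr p.2.1 ++ ", " ++ PySem.Int.toStr p.2.2 ++ ")"
  else if p.1 == n - 1 then "e(" ++ PySem.Int.toStr p.2.1 ++ ", " ++ PySem.Int.toStr p.2.2 ++ ")"
  else "(" ++ PySem.Int.toStr p.2.1 ++ ", " ++ PySem.Int.toStr p.2.2 ++ ")"

theorem pvA_eq_map (path : List (Int × Int)) :
    format_path_output path
      = "[" ++ PySem.Str.join ", " ((PySem.List.enumerate path).map (pvG (path.length : Int))) ++ "]" := by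
  unfold format_path_output
  have h : ∀ (l : List (Int × (Int × Int))) (acc : List String),
      l.foldl (fun acc p =>
        if p.1 == 0 then
          acc ++ ["s(" ++ PySem.Int.toStr p.2.1 ++ ", " ++ PySem.Int.toStr p.2.2 ++ ")"]
        else if p.1 == (path.length : Int) - 1 then
          acc ++ ["e(" ++ PySem.Int.toStr p.2.1 ++ ", " ++ PySem.Int.toStr p.2.2 ++ ")"]
        else
          acc ++ ["(" ++ PySem.Int.toStr p.2.1 ++ ", " ++ PySem.Int.toStr p.2.2 ++ ")"]) acc
        = acc ++ l.map (pvG (path.length : Int)) := by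
    intro l
    induction l with
    | nil => intro acc; simp
    | cons x t ih =>
      intro acc
      simp only [List.foldl_cons, List.map_cons, ih, pvG]
      split_ifs <;> simp
  have := h (PySem.List.enumerate path) []
  simp only [List.nil_append] at this
  rw [this]

theorem pvJoin_cons_cons (a b : String) (l : List String) :
    PySem.Str.join ", " (a :: b :: l) = a ++ ", " ++ PySem.Str.join ", " (b :: l) := by
  apply String.toList_injective
  simp [PySem.Str.join, PySem.Chars.join_cons_cons]

theorem pvJoin_single (a : String) : PySem.Str.join ", " [a] = a := by
  apply String.toList_injective
  simp [PySem.Str.join, PySem.Chars.join_singleton]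

-- the joined tail of A equals B's recursive tail string
theorem pvRestEq (t : List (Int × Int)) : ∀ (s n : Int) (x : String), 0 < s → s + t.length = n →
    PySem.Str.join ", " (x :: (PySem.List.enumerate t s).map (pvG n)) = x ++ pvRest t := by
  induction t with
  | nil =>
    intro s n x _ _
    simp [PySem.List.enumerate_nil, pvJoin_single, pvRest]
  | cons a t ih =>
    intro s n x hs hn
    obtain ⟨r, c⟩ := a
    rw [PySem.List.enumerate_cons, List.map_cons, pvJoin_cons_cons]
    cases t with
    | nil =>
      have h0 : (s == 0) = false := by simp; omega
      have h1 : (s == n - 1) = true := by simp at hn ⊢; omega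
      simp only [PySem.List.enumerate_nil, List.map_nil, pvJoin_single, pvG, h0, h1,
        Bool.false_eq_true, if_false, if_true, pvRest]
      apply String.toList_injective
      simp
    | cons b t' =>
      have h0 : (s == 0) = false := by simp; omega
      have h1 : (s == n - 1) = false := by simp only [List.length_cons] at hn; simp; omega
      rw [ih (s + 1) n _ (by omega) (by simp at hn ⊢; omega)]
      show x ++ ", " ++ (pvG n (s, (r, c)) ++ pvRest (b :: t')) = x ++ pvRest ((r, c) :: b :: t')
      have hr : pvRest ((r, c) :: b :: t')
          = ", (" ++ PySem.Int.toStr r ++ ", " ++ PySem.Int.toStr c ++ ")" ++ pvRest (b :: t') := rfl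
      simp only [pvG, h0, h1, Bool.false_eq_true, if_false, hr]
      apply String.toList_injective
      simp

-- ===== VERDICT =====
theorem format_path_output_spec : Claim_equal_format_path_output := by
  intro path _
  unfold Spec_format_path_output
  rw [pvA_eq_map]
  cases path with
  | nil => simp [PySem.List.enumerate_nil]; rfl
  | cons a t =>
    obtain ⟨r, c⟩ := a
    rw [PySem.List.enumerate_cons, List.map_cons]
    have hg0 : pvG ((((r, c) :: t).length : Nat) : Int) (0, (r, c))
        = "s(" ++ PySem.Int.toStr r ++ ", " ++ PySem.Int.toStr c ++ ")" := by
      simp [pvG]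
    rw [zero_add, hg0, pvRestEq t 1 (((r, c) :: t).length : Int) _ (by omega) (by simp; omega)]
    show "[" ++ ("s(" ++ PySem.Int.toStr r ++ ", " ++ PySem.Int.toStr c ++ ")" ++ pvRest t) ++ "]"
      = format_path_output_alt ((r, c) :: t)
    apply String.toList_injective
    simp [format_path_output_alt]
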